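-- pv_equiv track=rewrite | github.com/Miguel-Andrade-Cruz/Exprer | chunker.py | chunkOperations
-- ===== SOURCE A (Python) =====
-- def chunkOperations(splitted_exp):
--     operators = [ sym for sym in splitted_exp if sym in ["+", "-", "*", "/"] ]
--     chunks = []
--     for operator in operators:
--         operator_pos = splitted_exp.index(operator)
--
--         value_one = splitted_exp[operator_pos - 1]
--         value_two = splitted_exp[operator_pos + 1]
--
--         chunk = [ value_one, operator, value_two ]
--
--         chunks.append(chunk)
--         splitted_exp.remove(operator)
--     return chunks
-- ===== SOURCE B (Python) =====
-- def chunkOperations(splitted_exp):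
--     # One forward pass collecting the value tokens; each operator is chunked with
--     # the most recent value and the next token, and the value list replaces the
--     # input at the end (all operators removed).
--     ops = {"+", "-", "*", "/"}
--     chunks = []
--     values = []
--     for i, tok in enumerate(splitted_exp):
--         if tok in ops:
--             chunks.append([values[-1], tok, splitted_exp[i + 1]])
--         else:
--             values.append(tok)
--     splitted_exp[:] = values
--     return chunks
-- ===== Notes on version B (the rewrite author's own statement) =====
-- stated objective: alternative
-- what changed: Replaced the per-operator rescans (list.index, indexing and list.remove on the shrinking list) by a single forward pass that collects value tokens and chunks each operator with the most recent value and the next token; Pre_ excludes lists ending in an operator (A raises IndexError) and lists starting with an operator, where A's left operand comes from accidental negative-index wraparound and B raises IndexError.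
-- outside the precondition, e.g. on chunkOperations(['+', '2']): A returns [['2', '+', '2']], B raises IndexError
import Mathlib
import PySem

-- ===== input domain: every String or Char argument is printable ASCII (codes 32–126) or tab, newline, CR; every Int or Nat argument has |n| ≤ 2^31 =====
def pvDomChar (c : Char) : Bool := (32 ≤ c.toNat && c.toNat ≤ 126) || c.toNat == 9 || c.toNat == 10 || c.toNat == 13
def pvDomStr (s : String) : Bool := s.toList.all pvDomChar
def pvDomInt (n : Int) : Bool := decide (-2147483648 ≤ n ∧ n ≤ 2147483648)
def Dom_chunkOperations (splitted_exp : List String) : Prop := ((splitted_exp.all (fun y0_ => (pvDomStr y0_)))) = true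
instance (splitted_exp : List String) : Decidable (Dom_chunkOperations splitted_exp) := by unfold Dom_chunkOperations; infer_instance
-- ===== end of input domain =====

-- B replaces A's per-operator rescans (index / negative indexing / remove on the shrinking list)
-- by one forward pass collecting the value tokens; objective: alternative. Both Pythons mutate
-- splitted_exp identically on Pre_ (all operator tokens removed); the equivalence proved here is
-- about the RETURN value.

-- ===== PORT A =====
def pvOps : List String := ["+", "-", "*", "/"]

def pvStepA (st : List String × List (List String)) (operator : String) :
    List String × List (List String) :=
  match PySem.List.index? st.1 operator with
  | none => st  -- Python would raise ValueError; unreachable (operator stays in the list)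
  | some pos =>
    match PySem.List.pyGet? st.1 ((pos : Int) - 1), PySem.List.pyGet? st.1 ((pos : Int) + 1) with
    | some v1, some v2 =>
        ((PySem.List.remove? st.1 operator).getD st.1, st.2 ++ [[v1, operator, v2]])
    | _, _ => st  -- IndexError: outside Pre_chunkOperations

def chunkOperations (splitted_exp : List String) : List (List String) :=
  let operators := splitted_exp.filter (fun sym => pvOps.contains sym)
  (operators.foldl pvStepA (splitted_exp, [])).2

-- ===== PORT B =====
def pvIsOp (tok : String) : Bool := tok == "+" || tok == "-" || tok == "*" || tok == "/"

def pvGoB (splitted_exp : List String) (values : List String) (i : Nat) :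
    List String → List (List String)
  | [] => []
  | tok :: rest =>
    if pvIsOp tok then
      match PySem.List.pyGet? values (-1), PySem.List.pyGet? splitted_exp ((i : Int) + 1) with
      | some left, some right => [left, tok, right] :: pvGoB splitted_exp values (i + 1) rest
      | _, _ => pvGoB splitted_exp values (i + 1) rest  -- IndexError: outside Pre_chunkOperations
    else pvGoB splitted_exp (values ++ [tok]) (i + 1) rest

def chunkOperations_alt (splitted_exp : List String) : List (List String) :=
  pvGoB splitted_exp [] 0 splitted_exp

-- ===== PRECONDITION & SPEC =====
-- Pre_ excludes (a) lists whose LAST token is an operator, where A raises IndexError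
-- (splitted_exp[pos+1] does not exist; B raises there too), and (b) lists whose FIRST token is an
-- operator, where A's left operand is the accidental negative-index wraparound splitted_exp[-1]
-- and B itself raises IndexError (values[-1] on the empty value list).
def Pre_chunkOperations (splitted_exp : List String) : Prop :=
  ¬ (splitted_exp.head? ∈ [some "+", some "-", some "*", some "/"]) ∧
  ¬ (splitted_exp.getLast? ∈ [some "+", some "-", some "*", some "/"])
instance (splitted_exp : List String) : Decidable (Pre_chunkOperations splitted_exp) := by
  unfold Pre_chunkOperations; infer_instance

def pvWitness_chunkOperations : List String := ["1", "+", "2", "*", "x"]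

def Spec_chunkOperations (splitted_exp : List String) (out : List (List String)) : Prop :=
  out = chunkOperations_alt splitted_exp
instance (splitted_exp : List String) (out : List (List String)) :
    Decidable (Spec_chunkOperations splitted_exp out) := by
  unfold Spec_chunkOperations; infer_instance

-- ===== CLAIM (what is proved, stated in full; the proofs are below) =====
def Claim_equal_chunkOperations : Prop := ∀ (splitted_exp : List String),
  Dom_chunkOperations splitted_exp → Pre_chunkOperations splitted_exp →
  Spec_chunkOperations splitted_exp (chunkOperations splitted_exp)

-- ===== LEMMAS AND PROOFS =====

-- Common reference recursion both ports are reduced to: prev = last value token seen so far.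
def pvGoSpec : Option String → List String → List (List String)
  | _, [] => []
  | prev, tok :: rest =>
    if pvIsOp tok then
      match rest, prev with
      | r :: _, some p => [p, tok, r] :: pvGoSpec prev rest
      | _, _ => pvGoSpec prev rest
    else pvGoSpec (some tok) rest

-- B's pass equals the reference recursion (values.getLast? plays prev).
theorem pvGoB_eq_spec (l : List String) (pre toks values : List String)
    (h : l = pre ++ toks) :
    pvGoB l values pre.length toks = pvGoSpec values.getLast? toks := by
  induction toks generalizing pre values with
  | nil => rfl
  | cons tok rest ih =>
    have hget : PySem.List.pyGet? l ((pre.length : Int) + 1) = rest[0]? := by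
      subst h
      simpa using PySem.List.pyGet?_append_right pre (tok :: rest) 1
    have ih' := ih (pre ++ [tok]) values (by simp [h])
    have ih'' := ih (pre ++ [tok]) (values ++ [tok]) (by simp [h])
    rw [show (pre ++ [tok]).length = pre.length + 1 by simp] at ih' ih''
    by_cases hop : pvIsOp tok
    · have hneg : PySem.List.pyGet? values (-1) = values.getLast? := by
        simp [PySem.List.pyGet?_neg_one]
      cases rest with
      | nil =>
        cases hv : values.getLast? with
        | none => simp [pvGoB, pvGoSpec, hop, hneg, hv, hget]
        | some p => simp [pvGoB, pvGoSpec, hop, hneg, hv, hget]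
      | cons r rest' =>
        cases hv : values.getLast? with
        | none => simpa [pvGoB, pvGoSpec, hop, hneg, hv, hget] using ih'
        | some p => simpa [pvGoB, pvGoSpec, hop, hneg, hv, hget] using ih'
    · have hf : pvIsOp tok = false := by simpa using hop
      have hl' : (values ++ [tok]).getLast? = some tok := by simp
      rw [hl'] at ih''
      simpa [pvGoB, pvGoSpec, hf] using ih''

-- remove? removes the head of the suffix when the value is absent from the prefix.
theorem pvRemove?_append (pre suf : List String) (v : String) (hv : v ∉ pre) :
    PySem.List.remove? (pre ++ v :: suf) v = some (pre ++ suf) := by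
  induction pre with
  | nil => simp
  | cons a pre ih =>
    have ha : a ≠ v := fun e => hv (by simp [e])
    rw [List.cons_append, PySem.List.remove?_cons_of_ne _ ha,
      ih (fun hm => hv (List.mem_cons_of_mem a hm))]
    rfl

-- A's fold invariant: the current list is a non-empty operator-free prefix ++ the unprocessed
-- suffix whose last element (if the suffix is the tail end) is a non-operator.
theorem pvFoldA_inv (suf : List String) : ∀ (clean : List String)
    (chunks0 : List (List String)) (w : String),
    clean ≠ [] →
    (∀ x ∈ clean, pvIsOp x = false) →
    (clean ++ suf).getLast? = some w → pvIsOp w = false →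
    ((suf.filter pvIsOp).foldl pvStepA (clean ++ suf, chunks0)).2
      = chunks0 ++ pvGoSpec clean.getLast? suf := by
  induction suf with
  | nil => intro clean chunks0 w _ _ _ _; simp [pvGoSpec]
  | cons tok rest ih =>
    intro clean chunks0 w hne hclean hlast hw
    by_cases hop : pvIsOp tok
    · have htok : tok ∉ clean := fun hm => by simp [hclean tok hm] at hop
      cases rest with
      | nil =>
        exfalso
        rw [List.getLast?_append_of_ne_nil _ (by simp)] at hlast
        simp at hlast
        subst hlast
        simp [hop] at hw
      | cons r rest' =>
        have hidx : PySem.List.index? (clean ++ tok :: r :: rest') tok = some clean.length :=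
          (PySem.List.index?_eq_some_iff _ _ _).mpr ⟨clean, r :: rest', rfl, rfl, htok⟩
        have hget2 : PySem.List.pyGet? (clean ++ tok :: r :: rest') ((clean.length : Int) + 1)
            = some r := by
          simpa using PySem.List.pyGet?_append_right clean (tok :: r :: rest') 1
        have hrem : PySem.List.remove? (clean ++ tok :: r :: rest') tok
            = some (clean ++ r :: rest') := pvRemove?_append clean (r :: rest') tok htok
        have hlast' : (clean ++ r :: rest').getLast? = some w := by
          rw [List.getLast?_append_of_ne_nil _ (by simp)] at hlast ⊢
          simpa using hlast
        obtain ⟨p, hp⟩ : ∃ p, clean.getLast? = some p := by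
          cases hc : clean.getLast? with
          | none => exact absurd (List.getLast?_eq_none_iff.mp hc) hne
          | some p => exact ⟨p, rfl⟩
        have hget1 : PySem.List.pyGet? (clean ++ tok :: r :: rest') ((clean.length : Int) - 1)
            = some p := by
          have hpos : 0 < clean.length := List.length_pos_of_ne_nil hne
          rw [show ((clean.length : Int) - 1) = ((clean.length - 1 : Nat) : Int) by omega,
            PySem.List.pyGet?_natCast, List.getElem?_append_left (by omega),
            ← List.getLast?_eq_getElem?, hp]
        have hstep : pvStepA (clean ++ tok :: r :: rest', chunks0) tok
            = (clean ++ r :: rest', chunks0 ++ [[p, tok, r]]) := by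
          simp only [pvStepA]
          rw [hidx]
          simp [hget1, hget2, hrem]
        rw [List.filter_cons_of_pos hop, List.foldl_cons, hstep,
          ih clean _ w hne hclean hlast' hw]
        simp [pvGoSpec, hop, hp]
    · have hf : pvIsOp tok = false := by simpa using hop
      have ih' := ih (clean ++ [tok]) chunks0 w (by simp)
        (by
          intro x hx
          rcases List.mem_append.mp hx with h | h
          · exact hclean x h
          · simp at h; subst h; exact hf)
        (by simpa [List.append_assoc] using hlast)
        hw
      rw [List.filter_cons_of_neg (by simp [hf]),
        show clean ++ tok :: rest = (clean ++ [tok]) ++ rest by simp, ih']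
      simp [pvGoSpec, hf]

-- ===== VERDICT (by name: the statement is the Claim_ definition above) =====
theorem chunkOperations_spec : Claim_equal_chunkOperations := by
  unfold Claim_equal_chunkOperations
  intro l _ hpre
  unfold Spec_chunkOperations chunkOperations chunkOperations_alt
  obtain ⟨hhead, hlast⟩ := hpre
  cases l with
  | nil => rfl
  | cons h0 t =>
    have hh : pvIsOp h0 = false := by
      rw [List.head?_cons] at hhead
      simp at hhead
      simp [pvIsOp, beq_eq_false_iff_ne]
      tauto
    obtain ⟨w, hw⟩ : ∃ w, (h0 :: t).getLast? = some w := by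
      cases hc : (h0 :: t).getLast? with
      | none => simp at hc
      | some w => exact ⟨w, rfl⟩
    have hwop : pvIsOp w = false := by
      rw [hw] at hlast
      simp at hlast
      simp [pvIsOp, beq_eq_false_iff_ne]
      tauto
    have hA := pvFoldA_inv t [h0] [] w (by simp) (by simpa using hh)
      (by simpa using hw) hwop
    have hB0 := pvGoB_eq_spec (h0 :: t) [] (h0 :: t) [] rfl
    have hB1 := pvGoB_eq_spec (h0 :: t) [h0] t [h0] rfl
    have hfl : (h0 :: t).filter (fun sym => pvOps.contains sym) = (h0 :: t).filter pvIsOp := by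
      apply List.filter_congr
      intro x _
      show pvOps.contains x = pvIsOp x
      simp [pvOps, pvIsOp, Bool.or_assoc, beq_eq_decide]
    rw [hfl, List.filter_cons_of_neg (by simp [hh]),
      show (h0 : String) :: t = [h0] ++ t from rfl, hA]
    have hunf : pvGoB (h0 :: t) [] 0 (h0 :: t) = pvGoB (h0 :: t) [h0] 1 t := by
      simp [pvGoB, hh]
    simp only [List.length_cons, List.length_nil, Nat.zero_add] at hB1
    simp only [List.cons_append, List.nil_append] at *
    rw [hunf, hB1]
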